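-- pv_equiv track=rewrite | github.com/kubokawa-dev/million-pocket-orchestra | tools/generate_loto6_predictions_mvp.py | greedy_cooccur_main
-- ===== SOURCE A (Python) =====
-- def greedy_cooccur_main(
--     seed: int,
--     pair_counts: dict[tuple[int, int], int],
-- ) -> tuple[int, ...]:
--     selected: set[int] = {seed}
--     while len(selected) < 6:
--         best_c: int | None = None
--         best_s = -1
--         for c in range(1, 44):
--             if c in selected:
--                 continue
--             s = 0
--             for x in selected:
--                 a, b = (c, x) if c < x else (x, c)
--                 s += pair_counts.get((a, b), 0)
--             if s > best_s or (s == best_s and (best_c is None or c < best_c)):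
--                 best_s = s
--                 best_c = c
--         if best_c is None:
--             break
--         selected.add(best_c)
--     return tuple(sorted(selected))
-- ===== SOURCE B (Python) =====
-- def greedy_cooccur_main(
--     seed: int,
--     pair_counts: dict[tuple[int, int], int],
-- ) -> tuple[int, ...]:
--     # Incremental greedy: keep a running co-occurrence score per candidate,
--     # updated once after each pick, instead of re-summing over the selected
--     # set for every candidate in every round.
--     def pc(a: int, b: int) -> int:
--         return pair_counts.get((min(a, b), max(a, b)), 0)
--
--     score = [pc(c, seed) for c in range(44)]
--     selected = [seed]
--     for _ in range(5):
--         best_c = None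
--         best_s = -1
--         for c in range(1, 44):
--             if c not in selected and (score[c] > best_s or (best_c is None and score[c] == best_s)):
--                 best_c = c
--                 best_s = score[c]
--         if best_c is None:
--             break
--         selected.append(best_c)
--         score = [score[c] + pc(c, best_c) for c in range(44)]
--     return tuple(sorted(selected))
-- ===== Notes on version B (the rewrite author's own statement) =====
-- stated objective: alternative
-- what changed: B maintains a running co-occurrence score per candidate, initialized from the seed and updated once after each pick, instead of A's re-summing over the whole selected set for every candidate in every round.
import Mathlib
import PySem

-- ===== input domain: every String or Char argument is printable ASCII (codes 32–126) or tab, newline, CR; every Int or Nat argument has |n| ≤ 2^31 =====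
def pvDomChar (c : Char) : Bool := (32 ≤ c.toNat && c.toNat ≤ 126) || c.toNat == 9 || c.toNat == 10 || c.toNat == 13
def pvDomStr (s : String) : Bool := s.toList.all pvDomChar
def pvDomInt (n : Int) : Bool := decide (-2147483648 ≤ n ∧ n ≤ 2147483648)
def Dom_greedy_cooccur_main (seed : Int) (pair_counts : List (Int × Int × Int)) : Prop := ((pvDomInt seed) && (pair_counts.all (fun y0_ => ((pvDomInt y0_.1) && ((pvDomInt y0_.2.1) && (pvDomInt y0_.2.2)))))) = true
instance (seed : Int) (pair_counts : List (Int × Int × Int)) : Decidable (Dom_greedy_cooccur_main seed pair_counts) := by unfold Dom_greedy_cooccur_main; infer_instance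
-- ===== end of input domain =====

-- B replaces A's per-round re-summation over the selected set by a running score per
-- candidate, updated once after each pick (different decomposition, same cost class).

-- ===== PORT A =====
-- the dict[tuple[int,int], int] argument, rebuilt as a Python dict (later duplicates overwrite)
def pvPairDict (pair_counts : List (Int × Int × Int)) : PySem.Dict (Int × Int) Int :=
  PySem.Dict.ofList (pair_counts.map (fun e => ((e.1, e.2.1), e.2.2)))

-- pair_counts.get((a, b), 0)
def pvGetA (d : PySem.Dict (Int × Int) Int) (a b : Int) : Int := d.getD (a, b) 0

-- the inner 'for x in selected: s += …' accumulation (a sum: independent of the set's iteration order)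
def pvSumA (d : PySem.Dict (Int × Int) Int) (c : Int) (sel : List Int) : Int :=
  sel.foldl (fun s x => s + (if c < x then pvGetA d c x else pvGetA d x c)) 0

-- the 'for c in range(1, 44)' scan: state (best_c, best_s)
def pvScanA (d : PySem.Dict (Int × Int) Int) (sel : List Int) : Option Int × Int :=
  (PySem.List.pyRange 1 44 1).foldl
    (fun st c =>
      if sel.contains c then st
      else
        if decide (pvSumA d c sel > st.2) || (decide (pvSumA d c sel = st.2) &&
            (match st.1 with | none => true | some b => decide (c < b))) then
          (some c, pvSumA d c sel)
        else st)
    (none, -1)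

-- the 'while len(selected) < 6' loop; each pass adds one fresh number, so 5 passes suffice
def pvLoopA (d : PySem.Dict (Int × Int) Int) : Nat → PySem.Set Int → PySem.Set Int
  | 0, sel => sel
  | n + 1, sel =>
    if sel.length < 6 then
      match (pvScanA d sel).1 with
      | none => sel
      | some y => pvLoopA d n (PySem.Set.add sel y)
    else sel

def greedy_cooccur_main (seed : Int) (pair_counts : List (Int × Int × Int)) : List Int :=
  PySem.List.sorted (pvLoopA (pvPairDict pair_counts) 5 (PySem.Set.ofList [seed])) (fun x => x) false

-- ===== PORT B =====
-- pc(a, b) = pair_counts.get((min(a, b), max(a, b)), 0)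
def pvPc (d : PySem.Dict (Int × Int) Int) (a b : Int) : Int := d.getD (min a b, max a b) 0

-- B's scan over candidates reading the maintained score list (score[c]; c is always in range)
def pvScanB (sel : List Int) (score : List Int) : Option Int × Int :=
  (PySem.List.pyRange 1 44 1).foldl
    (fun st c =>
      if !sel.contains c &&
          (decide (PySem.List.pyGetD score c 0 > st.2) ||
            (st.1.isNone && decide (PySem.List.pyGetD score c 0 = st.2))) then
        (some c, PySem.List.pyGetD score c 0)
      else st)
    (none, -1)

-- 'for _ in range(5)' with break; after a pick the score list is rebuilt by comprehension
def pvLoopB (d : PySem.Dict (Int × Int) Int) : Nat → List Int → List Int → List Int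
  | 0, sel, _ => sel
  | n + 1, sel, score =>
    match (pvScanB sel score).1 with
    | none => sel
    | some y =>
        pvLoopB d n (sel ++ [y])
          ((PySem.List.pyRange 0 44 1).map (fun c => PySem.List.pyGetD score c 0 + pvPc d c y))

def greedy_cooccur_main_alt (seed : Int) (pair_counts : List (Int × Int × Int)) : List Int :=
  PySem.List.sorted
    (pvLoopB (pvPairDict pair_counts) 5 [seed]
      ((PySem.List.pyRange 0 44 1).map (fun c => pvPc (pvPairDict pair_counts) c seed)))
    (fun x => x) false

-- ===== PRECONDITION & SPEC =====
def Spec_greedy_cooccur_main (seed : Int) (pair_counts : List (Int × Int × Int)) (out : List Int) : Prop := out = greedy_cooccur_main_alt seed pair_counts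
instance (seed : Int) (pair_counts : List (Int × Int × Int)) (out : List Int) : Decidable (Spec_greedy_cooccur_main seed pair_counts out) := by unfold Spec_greedy_cooccur_main; infer_instance

-- ===== CLAIM (what is proved, stated in full; the proofs are below) =====
def Claim_equal_greedy_cooccur_main : Prop := ∀ (seed : Int) (pair_counts : List (Int × Int × Int)), Dom_greedy_cooccur_main seed pair_counts → Spec_greedy_cooccur_main seed pair_counts (greedy_cooccur_main seed pair_counts)

-- ===== LEMMAS AND PROOFS =====

-- A's branch-oriented pair key equals B's (min, max) key
theorem pvGetA_eq_pvPc (d : PySem.Dict (Int × Int) Int) (c x : Int) :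
    (if c < x then pvGetA d c x else pvGetA d x c) = pvPc d c x := by
  unfold pvGetA pvPc
  by_cases h : c < x
  · rw [if_pos h, min_eq_left h.le, max_eq_right h.le]
  · have h' : x ≤ c := not_lt.mp h
    rw [if_neg h, min_eq_right h', max_eq_left h']

theorem pvSumA_singleton (d : PySem.Dict (Int × Int) Int) (c s : Int) :
    pvSumA d c [s] = pvPc d c s := by
  simp [pvSumA, pvGetA_eq_pvPc]

theorem pvSumA_append (d : PySem.Dict (Int × Int) Int) (c y : Int) (sel : List Int) :
    pvSumA d c (sel ++ [y]) = pvSumA d c sel + pvPc d c y := by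
  simp [pvSumA, List.foldl_append, pvGetA_eq_pvPc]

-- B's scan never selects an already-selected number
theorem scanB_fresh (sel score : List Int) :
    ∀ y, (pvScanB sel score).1 = some y → sel.contains y = false := by
  unfold pvScanB
  generalize PySem.List.pyRange 1 44 1 = l
  suffices h : ∀ (st : Option Int × Int), (∀ b, st.1 = some b → sel.contains b = false) →
      ∀ y, ((l.foldl (fun st c =>
        if !sel.contains c &&
            (decide (PySem.List.pyGetD score c 0 > st.2) ||
              (st.1.isNone && decide (PySem.List.pyGetD score c 0 = st.2))) then
          (some c, PySem.List.pyGetD score c 0)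
        else st) st).1 = some y) → sel.contains y = false by
    exact h (none, -1) (by intro b hb; simp at hb)
  induction l with
  | nil => intro st hst; exact hst
  | cons c t ih =>
    intro st hst
    simp only [List.foldl_cons]
    by_cases hok : (!sel.contains c &&
        (decide (PySem.List.pyGetD score c 0 > st.2) ||
          (st.1.isNone && decide (PySem.List.pyGetD score c 0 = st.2)))) = true
    · rw [if_pos hok]
      refine ih _ ?_
      intro b hb
      obtain rfl : c = b := by simpa using hb
      cases h : sel.contains c with
      | false => rfl
      | true => rw [h] at hok; simp at hok
    · rw [if_neg hok]; exact ih st hst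

-- A's scan equals B's scan-shape fold on any strictly increasing candidate list:
-- the 'c < best_c' tie clause is dead once best_c lies among earlier candidates
theorem scan_fold_eq (sel : List Int) (g : Int → Int) :
    ∀ (l : List Int), l.Pairwise (· < ·) →
    ∀ (st : Option Int × Int), (∀ b, st.1 = some b → ∀ c ∈ l, b < c) →
    l.foldl (fun st c =>
        if sel.contains c then st
        else
          if decide (g c > st.2) || (decide (g c = st.2) &&
              (match st.1 with | none => true | some b => decide (c < b))) then
            (some c, g c)
          else st) st
    = l.foldl (fun st c =>
        if !sel.contains c &&
            (decide (g c > st.2) || (st.1.isNone && decide (g c = st.2))) then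
          (some c, g c)
        else st) st := by
  intro l
  induction l with
  | nil => intro _ st _; rfl
  | cons c t ih =>
    intro hp st hst
    have hpt : t.Pairwise (· < ·) := hp.of_cons
    simp only [List.foldl_cons]
    by_cases hc : sel.contains c = true
    · rw [if_pos hc, if_neg (by simp only [hc, Bool.not_true, Bool.false_and]; exact Bool.false_ne_true)]
      exact ih hpt st (fun b hb c' hc' => hst b hb c' (List.mem_cons_of_mem _ hc'))
    · have hmem : c ∉ sel := by simpa using hc
      rw [if_neg hc]
      have hcond : (decide (g c > st.2) || (decide (g c = st.2) &&
          (match st.1 with | none => true | some b => decide (c < b))))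
          = (!sel.contains c && (decide (g c > st.2) || (st.1.isNone && decide (g c = st.2)))) := by
        cases h1 : st.1 with
        | none => simp [hmem]
        | some b =>
          have hb : b < c := hst b h1 c (List.mem_cons_self ..)
          simp [hmem, show ¬(c < b) from not_lt.mpr hb.le]
      rw [hcond]
      by_cases hok : (!sel.contains c &&
          (decide (g c > st.2) || (st.1.isNone && decide (g c = st.2)))) = true
      · rw [if_pos hok]
        refine ih hpt (some c, g c) ?_
        intro b hb c' hc'
        obtain rfl : c = b := by simpa using hb
        exact (List.pairwise_cons.mp hp).1 c' hc'
      · rw [if_neg hok]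
        exact ih hpt st (fun b hb c' hc' => hst b hb c' (List.mem_cons_of_mem _ hc'))

-- reading B's score list at an in-range candidate gives the maintained score function
theorem pyGetD_scoreOf (f : Int → Int) (c : Int) (h0 : 0 ≤ c) (h44 : c < 44) :
    PySem.List.pyGetD ((PySem.List.pyRange 0 44 1).map f) c 0 = f c :=
  PySem.List.pyGetD_map_pyRange_of_nonneg f 44 c 0 h0 h44

-- A's scan equals B's scan when the score list carries the current sums
theorem scanA_eq_scanB (d : PySem.Dict (Int × Int) Int) (sel : List Int) :
    pvScanA d sel = pvScanB sel ((PySem.List.pyRange 0 44 1).map (fun c => pvSumA d c sel)) := by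
  unfold pvScanA pvScanB
  have hB := PySem.List.foldl_congr_mem
    (l := PySem.List.pyRange 1 44 1) (init := ((none : Option Int), (-1 : Int)))
    (f := fun (st : Option Int × Int) c =>
      if !sel.contains c &&
          (decide (PySem.List.pyGetD ((PySem.List.pyRange 0 44 1).map (fun c => pvSumA d c sel)) c 0 > st.2) ||
            (st.1.isNone && decide (PySem.List.pyGetD ((PySem.List.pyRange 0 44 1).map (fun c => pvSumA d c sel)) c 0 = st.2))) then
        (some c, PySem.List.pyGetD ((PySem.List.pyRange 0 44 1).map (fun c => pvSumA d c sel)) c 0)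
      else st)
    (g := fun (st : Option Int × Int) c =>
      if !sel.contains c &&
          (decide (pvSumA d c sel > st.2) || (st.1.isNone && decide (pvSumA d c sel = st.2))) then
        (some c, pvSumA d c sel)
      else st)
    (by
      intro acc c hc
      have hm := (PySem.List.mem_pyRange_one).mp hc
      simp only [pyGetD_scoreOf (fun c => pvSumA d c sel) c (by omega) (by omega)])
  rw [hB]
  exact scan_fold_eq sel (fun c => pvSumA d c sel) _
    (PySem.List.pairwise_lt_pyRange_one 1 44) (none, -1) (by intro b hb; simp at hb)

-- the main loop invariant: B's score list is exactly A's per-candidate sums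
theorem loopA_eq_loopB (d : PySem.Dict (Int × Int) Int) :
    ∀ (n : Nat) (sel : List Int), sel.length + n = 6 →
    pvLoopA d n sel = pvLoopB d n sel ((PySem.List.pyRange 0 44 1).map (fun c => pvSumA d c sel)) := by
  intro n
  induction n with
  | zero => intro sel _; rfl
  | succ n ih =>
    intro sel hlen
    unfold pvLoopA pvLoopB
    rw [if_pos (by omega : sel.length < 6), ← scanA_eq_scanB]
    cases hscan : (pvScanA d sel).1 with
    | none => rfl
    | some y =>
      have hfresh : sel.contains y = false :=
        scanB_fresh sel _ y (by rw [← scanA_eq_scanB]; exact hscan)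
      show pvLoopA d n (PySem.Set.add sel y)
          = pvLoopB d n (sel ++ [y])
              ((PySem.List.pyRange 0 44 1).map
                (fun c => PySem.List.pyGetD ((PySem.List.pyRange 0 44 1).map (fun c => pvSumA d c sel)) c 0 + pvPc d c y))
      have hadd : PySem.Set.add sel y = sel ++ [y] := by
        simp only [PySem.Set.add, PySem.Set.contains]
        rw [if_neg (by simpa using hfresh)]
      have hscore :
          ((PySem.List.pyRange 0 44 1).map
            (fun c => PySem.List.pyGetD ((PySem.List.pyRange 0 44 1).map (fun c => pvSumA d c sel)) c 0 + pvPc d c y))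
          = (PySem.List.pyRange 0 44 1).map (fun c => pvSumA d c (sel ++ [y])) := by
        refine List.map_congr_left ?_
        intro c hc
        have hm := (PySem.List.mem_pyRange_one).mp hc
        rw [pyGetD_scoreOf (fun c => pvSumA d c sel) c (by omega) (by omega), pvSumA_append]
      rw [hadd, hscore]
      exact ih (sel ++ [y]) (by simp at hlen ⊢; omega)

-- ===== VERDICT (by name: the statement is the Claim_ definition above) =====
theorem greedy_cooccur_main_spec : Claim_equal_greedy_cooccur_main := by
  intro seed pair_counts _
  unfold Spec_greedy_cooccur_main greedy_cooccur_main greedy_cooccur_main_alt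
  have hinit : ((PySem.List.pyRange 0 44 1).map (fun c => pvPc (pvPairDict pair_counts) c seed))
      = (PySem.List.pyRange 0 44 1).map (fun c => pvSumA (pvPairDict pair_counts) c [seed]) :=
    List.map_congr_left (fun c _ => (pvSumA_singleton _ c seed).symm)
  rw [show PySem.Set.ofList [seed] = [seed] from rfl, hinit,
    loopA_eq_loopB (pvPairDict pair_counts) 5 [seed] (by simp)]
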